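-- pv_equiv track=rewrite | github.com/pypi-data/pypi-mirror-400 | packages/markitdown1/markitdown1-0.1.1.tar.gz/markitdown1-0.1.1/markitdown1/getmd1.py | extract_qiita_title_from_metadata
-- ===== SOURCE A (Python) =====
-- def extract_qiita_title_from_metadata(md_text: str) -> str:
--     """
--     从 Qiita Markdown 的 YAML metadata 中提取 title
--     """
--     lines = md_text.splitlines()
--
--     if not lines or lines[0].strip() != "---":
--         return "untitled"
--
--     for line in lines[1:]:
--         if line.strip() == "---":
--             break
--         if line.startswith("title:"):
--             return line[len("title:"):].strip().strip('"').strip("'")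
--
--     return "untitled"
-- ===== SOURCE B (Python) =====
-- def extract_qiita_title_from_metadata(md_text: str) -> str:
--     lines = md_text.splitlines()
--     if not lines or lines[0].strip() != "---":
--         return "untitled"
--     tail = lines[1:]
--     stripped = [l.strip() for l in tail]
--     end = stripped.index("---") if "---" in stripped else len(tail)
--     block = tail[:end]
--     hit = next((l for l in block if l.startswith("title:")), None)
--     if hit is None:
--         return "untitled"
--     return hit[len("title:"):].strip().strip('"').strip("'")
-- ===== Notes on version B (the rewrite author's own statement) =====
-- stated objective: alternative
-- what changed: A's single scan-and-break loop over the tail lines is replaced by two independent passes: first the YAML block boundary is located via a stripped-line index (block = tail[:end]), then the block is queried with next() for the first line beginning with the title key.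
import Mathlib
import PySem

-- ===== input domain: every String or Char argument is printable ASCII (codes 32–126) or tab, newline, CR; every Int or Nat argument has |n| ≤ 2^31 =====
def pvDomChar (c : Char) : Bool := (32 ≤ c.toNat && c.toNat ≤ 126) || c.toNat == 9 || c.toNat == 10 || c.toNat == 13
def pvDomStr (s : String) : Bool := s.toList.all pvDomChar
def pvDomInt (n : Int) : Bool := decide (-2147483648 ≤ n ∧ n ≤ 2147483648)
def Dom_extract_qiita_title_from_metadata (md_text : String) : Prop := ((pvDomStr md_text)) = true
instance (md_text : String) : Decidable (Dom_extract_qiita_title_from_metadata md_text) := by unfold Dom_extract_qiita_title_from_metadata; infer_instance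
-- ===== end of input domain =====

-- B replaces A's single scan-and-break loop by two independent passes (locate the closing fence, then query the block); alternative decomposition, same cost.

-- ===== PORT A =====
-- line[len("title:"):].strip().strip('"').strip("'")
def pvTitleVal (line : String) : String :=
  PySem.Str.stripChars (PySem.Str.stripChars (PySem.Str.strip (PySem.Str.slice line (some 6) none)) "\"") "'"

-- A's for-loop over lines[1:] with break on the fence and early return on 'title:'
def pvLoopA : List String → String
  | [] => "untitled"
  | l :: rest =>
    if PySem.Str.strip l = "---" then "untitled"
    else if PySem.Str.startswith l "title:" then pvTitleVal l
    else pvLoopA rest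

def extract_qiita_title_from_metadata (md_text : String) : String :=
  match PySem.Str.splitlines md_text with
  | [] => "untitled"
  | first :: rest =>
    if PySem.Str.strip first ≠ "---" then "untitled"
    else pvLoopA rest

-- ===== PORT B =====
def extract_qiita_title_from_metadata_alt (md_text : String) : String :=
  match PySem.Str.splitlines md_text with
  | [] => "untitled"
  | first :: tail =>
    if PySem.Str.strip first ≠ "---" then "untitled"
    else
      let stripped := tail.map PySem.Str.strip
      let endIdx := match PySem.List.index? stripped "---" with
        | some k => k
        | none => tail.length
      let block := tail.take endIdx
      match block.find? (fun l => PySem.Str.startswith l "title:") with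
      | some hit => pvTitleVal hit
      | none => "untitled"

-- ===== PRECONDITION & SPEC =====
def Spec_extract_qiita_title_from_metadata (md_text : String) (out : String) : Prop := out = extract_qiita_title_from_metadata_alt md_text
instance (md_text : String) (out : String) : Decidable (Spec_extract_qiita_title_from_metadata md_text out) := by unfold Spec_extract_qiita_title_from_metadata; infer_instance

-- ===== CLAIM (what is proved, stated in full; the proofs are below) =====
def Claim_equal_extract_qiita_title_from_metadata : Prop := ∀ (md_text : String), Dom_extract_qiita_title_from_metadata md_text → Spec_extract_qiita_title_from_metadata md_text (extract_qiita_title_from_metadata md_text)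

-- ===== LEMMAS AND PROOFS =====

-- the core invariant: A's scan-and-break equals B's index-then-take-then-find? on any tail
theorem pvLoopA_eq (tail : List String) :
    pvLoopA tail =
      (match (tail.take (match PySem.List.index? (tail.map PySem.Str.strip) "---" with
                          | some k => k | none => tail.length)).find?
              (fun l => PySem.Str.startswith l "title:") with
       | some hit => pvTitleVal hit
       | none => "untitled") := by
  induction tail with
  | nil => simp [pvLoopA]
  | cons l rest ih =>
    by_cases hf : PySem.Str.strip l = "---"
    · rw [show PySem.List.index? ((l :: rest).map PySem.Str.strip) "---" = some 0 by
        simp only [PySem.List.index?_eq_idxOf?, List.map_cons, hf]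
        rw [List.idxOf?_cons]
        simp]
      simp [pvLoopA, hf]
    · have hidx : PySem.List.index? ((l :: rest).map PySem.Str.strip) "---"
          = (PySem.List.index? (rest.map PySem.Str.strip) "---").map (· + 1) := by
        simpa using PySem.List.index?_cons_of_ne (x := PySem.Str.strip l)
          (xs := rest.map PySem.Str.strip) (v := "---") hf
      rw [hidx]
      cases hrec : PySem.List.index? (rest.map PySem.Str.strip) "---" with
      | none =>
        by_cases ht : PySem.Str.startswith l "title:" = true
        · have ht' : PySem.Chars.startswith l.toList ['t','i','t','l','e',':'] = true := by
            simpa using ht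
          simp [pvLoopA, hf, ht']
        · have ht' : PySem.Chars.startswith l.toList ['t','i','t','l','e',':'] = false := by
            simpa using eq_false_of_ne_true ht
          simp only [pvLoopA, hf, if_false, Option.map_none]
          rw [ih, hrec]
          simp [ht']
      | some k =>
        by_cases ht : PySem.Str.startswith l "title:" = true
        · have ht' : PySem.Chars.startswith l.toList ['t','i','t','l','e',':'] = true := by
            simpa using ht
          simp [pvLoopA, hf, ht']
        · have ht' : PySem.Chars.startswith l.toList ['t','i','t','l','e',':'] = false := by
            simpa using eq_false_of_ne_true ht
          simp only [pvLoopA, hf, if_false, Option.map_some]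
          rw [ih, hrec]
          simp [ht']

-- ===== VERDICT (by name: the statement is the Claim_ definition above) =====
theorem extract_qiita_title_from_metadata_spec : Claim_equal_extract_qiita_title_from_metadata := by
  intro md_text _
  unfold Spec_extract_qiita_title_from_metadata
  unfold extract_qiita_title_from_metadata extract_qiita_title_from_metadata_alt
  cases PySem.Str.splitlines md_text with
  | nil => rfl
  | cons first rest =>
    by_cases h : PySem.Str.strip first ≠ "---"
    · simp [h]
    · simp only [h, if_false]
      exact pvLoopA_eq rest
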